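-- pv_equiv track=rewrite | github.com/kenchang198/Python-Algorithm-Practice | 2025-04-23-2/code/mystery_function_analysis.py | mystery_function_2
-- ===== SOURCE A (Python) =====
-- def mystery_function_2(arr):
--     """
--     Mystery関数2の計算量分析
--     - 外側のループは n 回実行
--     - 内側のループは条件が満たされた場合のみ n 回実行
--     - 最悪の場合（すべての要素が偶数）: O(n²)
--     - 平均的な場合（約半数の要素が偶数）: O(n²/2) ≈ O(n²)
--     - 最良の場合（すべての要素が奇数）: O(n)
--     """
--     result = 0
--     operations = 0
--
--     for i in range(len(arr)):
--         operations += 1  # 比較操作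
--         if arr[i] % 2 == 0:  # 偶数の場合
--             for j in range(len(arr)):
--                 # 実際の操作
--                 result += arr[i] * arr[j]
--                 operations += 1
--
--     return result, operations
-- ===== SOURCE B (Python) =====
-- def mystery_function_2(arr):
--     # One pass: total sum, sum of evens, number of evens; then closed forms.
--     total = 0
--     sum_even = 0
--     count_even = 0
--     for x in arr:
--         total += x
--         if x % 2 == 0:
--             sum_even += x
--             count_even += 1
--     n = len(arr)
--     return sum_even * total, n * (1 + count_even)
-- ===== Notes on version B (the rewrite author's own statement) =====
-- stated objective: faster
-- what changed: Replaces the nested index loops by a single pass computing total sum, sum of even elements and their count, returning sum_even*total and n*(1+count_even) in closed form.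
import Mathlib
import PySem

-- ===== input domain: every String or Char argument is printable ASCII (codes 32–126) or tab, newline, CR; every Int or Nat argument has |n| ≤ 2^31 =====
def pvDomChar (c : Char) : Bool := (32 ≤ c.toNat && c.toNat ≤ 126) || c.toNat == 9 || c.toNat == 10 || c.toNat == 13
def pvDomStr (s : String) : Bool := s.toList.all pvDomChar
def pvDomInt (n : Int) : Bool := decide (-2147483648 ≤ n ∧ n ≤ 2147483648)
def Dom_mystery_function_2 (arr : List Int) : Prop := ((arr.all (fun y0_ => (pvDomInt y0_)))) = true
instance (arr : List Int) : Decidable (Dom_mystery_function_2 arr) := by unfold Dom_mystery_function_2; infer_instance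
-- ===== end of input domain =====

-- B replaces A's nested index loops by a single pass (total sum, even sum, even count) with closed-form results; objective: faster.


-- ===== PORT A =====
def mystery_function_2 (arr : List Int) : Int × Int :=
  (PySem.List.pyRange 0 (arr.length : Int) 1).foldl (fun (st : Int × Int) i =>
    let ops := st.2 + 1
    if PySem.Int.mod (PySem.List.pyGetD arr i 0) 2 == 0 then
      (PySem.List.pyRange 0 (arr.length : Int) 1).foldl (fun (st2 : Int × Int) j =>
        (st2.1 + PySem.List.pyGetD arr i 0 * PySem.List.pyGetD arr j 0, st2.2 + 1))
        (st.1, ops)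
    else
      (st.1, ops)) (0, 0)

-- ===== PORT B =====
def mystery_function_2_alt (arr : List Int) : Int × Int :=
  let t := arr.foldl (fun (s : Int × Int × Int) x =>
    (s.1 + x, if PySem.Int.mod x 2 == 0 then (s.2.1 + x, s.2.2 + 1) else s.2)) (0, 0, 0)
  (t.2.1 * t.1, (arr.length : Int) * (1 + t.2.2))

-- ===== PRECONDITION & SPEC =====
def Spec_mystery_function_2 (arr : List Int) (out : Int × Int) : Prop := out = mystery_function_2_alt arr
instance (arr : List Int) (out : Int × Int) : Decidable (Spec_mystery_function_2 arr out) := by unfold Spec_mystery_function_2; infer_instance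

-- ===== CLAIM (what is proved, stated in full; the proofs are below) =====
def Claim_equal_mystery_function_2 : Prop := ∀ (arr : List Int), Dom_mystery_function_2 arr → Spec_mystery_function_2 arr (mystery_function_2 arr)

-- ===== LEMMAS AND PROOFS =====

-- inner loop of A: adds a * (sum l) to result and (length l) to operations
theorem pv_inner_fold (a : Int) (l : List Int) : ∀ (r o : Int),
    l.foldl (fun (st2 : Int × Int) y => (st2.1 + a * y, st2.2 + 1)) (r, o)
      = (r + a * l.sum, o + l.length) := by
  induction l with
  | nil => intro r o; simp
  | cons x xs ih =>
      intro r o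
      rw [List.foldl_cons, ih]
      refine Prod.ext ?_ ?_ <;> simp [mul_add] <;> push_cast <;> ring

-- outer loop of A over elements, with the inner contribution already summed
theorem pv_outer_fold (p : Int → Bool) (S N : Int) (l : List Int) : ∀ (r o : Int),
    l.foldl (fun (st : Int × Int) x =>
        if p x then (st.1 + x * S, st.2 + 1 + N) else (st.1, st.2 + 1)) (r, o)
      = (r + (l.filter p).sum * S, o + l.length + (l.countP p : Int) * N) := by
  induction l with
  | nil => intro r o; simp
  | cons x xs ih =>
      intro r o
      rw [List.foldl_cons]
      by_cases h : p x <;>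
        simp only [h, if_true, if_false, ih, List.filter_cons, List.countP_cons,
          List.sum_cons, List.length_cons, ite_true, ite_false, cond_true, cond_false] <;>
        refine Prod.ext ?_ ?_ <;> simp <;> push_cast <;> ring

-- B's single pass computes (sum, even sum, even count)
theorem pv_b_fold (p : Int → Bool) (l : List Int) : ∀ (t se ce : Int),
    l.foldl (fun (s : Int × Int × Int) x =>
        (s.1 + x, if p x then (s.2.1 + x, s.2.2 + 1) else s.2)) (t, se, ce)
      = (t + l.sum, se + (l.filter p).sum, ce + (l.countP p : Int)) := by
  induction l with
  | nil => intro t se ce; simp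
  | cons x xs ih =>
      intro t se ce
      rw [List.foldl_cons]
      by_cases h : p x <;>
        simp only [h, if_true, if_false, List.filter_cons, List.countP_cons, List.sum_cons] <;>
        rw [ih] <;> simp [Prod.ext_iff] <;> push_cast <;>
        first
          | refine ⟨by ring, by ring, by ring⟩
          | refine ⟨by ring, by ring⟩
          | ring

-- ===== VERDICT (by name: the statement is the Claim_ definition above) =====
theorem mystery_function_2_spec : Claim_equal_mystery_function_2 := by
  intro arr _
  unfold Spec_mystery_function_2 mystery_function_2 mystery_function_2_alt
  rw [PySem.List.foldl_pyRange_zero_pyGetD'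
      (f := fun (st : Int × Int) x =>
        if PySem.Int.mod x 2 == 0 then
          (PySem.List.pyRange 0 (arr.length : Int) 1).foldl (fun (st2 : Int × Int) j =>
            (st2.1 + x * PySem.List.pyGetD arr j 0, st2.2 + 1)) (st.1, st.2 + 1)
        else (st.1, st.2 + 1))]
  have hinner : ∀ (x r o : Int),
      (PySem.List.pyRange 0 (arr.length : Int) 1).foldl (fun (st2 : Int × Int) j =>
        (st2.1 + x * PySem.List.pyGetD arr j 0, st2.2 + 1)) (r, o)
      = (r + x * arr.sum, o + arr.length) := by
    intro x r o
    rw [PySem.List.foldl_pyRange_zero_pyGetD'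
      (f := fun (st2 : Int × Int) y => (st2.1 + x * y, st2.2 + 1))]
    exact pv_inner_fold x arr r o
  have houter :
      arr.foldl (fun (st : Int × Int) x =>
        if PySem.Int.mod x 2 == 0 then
          (PySem.List.pyRange 0 (arr.length : Int) 1).foldl (fun (st2 : Int × Int) j =>
            (st2.1 + x * PySem.List.pyGetD arr j 0, st2.2 + 1)) (st.1, st.2 + 1)
        else (st.1, st.2 + 1)) (0, 0)
      = arr.foldl (fun (st : Int × Int) x =>
        if PySem.Int.mod x 2 == 0 then (st.1 + x * (arr.sum), st.2 + 1 + (arr.length : Int))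
        else (st.1, st.2 + 1)) (0, 0) := by
    apply PySem.List.foldl_congr_mem
    intro st x _
    by_cases h : PySem.Int.mod x 2 == 0 <;> simp only [h, if_true, if_false, hinner, ite_true, ite_false]
  rw [houter, pv_outer_fold (fun x => PySem.Int.mod x 2 == 0) arr.sum (arr.length : Int) arr 0 0,
      pv_b_fold (fun x => PySem.Int.mod x 2 == 0) arr 0 0 0]
  refine Prod.ext ?_ ?_ <;> simp <;> push_cast <;> ring
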